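-- pv_equiv track=rewrite | github.com/irfanFRizki/StatusWRTIrfan | root/telegram-bot/inventory_bot.py | categorize_by_timeframe
-- ===== SOURCE A (Python) =====
-- def categorize_by_timeframe(estimasi_list):
--     """Kategorikan data estimasi berdasarkan timeframe"""
--     categories = {
--         'week_1': [],
--         'week_2': [],
--         'week_3': [],
--         'month_1': [],
--         'later': []
--     }
--
--     for item in estimasi_list:
--         days = item['days_until']
--
--         if days < 0:
--             categories['week_1'].append(item)  # Terlambat masuk kategori minggu 1
--         elif days <= 7:
--             categories['week_1'].append(item)
--         elif days <= 14:
--             categories['week_2'].append(item)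
--         elif days <= 21:
--             categories['week_3'].append(item)
--         elif days <= 30:
--             categories['month_1'].append(item)
--         else:
--             categories['later'].append(item)
--
--     return categories
-- ===== SOURCE B (Python) =====
-- def categorize_by_timeframe(estimasi_list):
--     """Kategorikan data estimasi berdasarkan timeframe"""
--     bounds = [7, 14, 21, 30]
--     names = ['week_1', 'week_2', 'week_3', 'month_1', 'later']
--
--     def bucket(item):
--         # index of the first inclusive upper bound not below days (bisect_left)
--         return sum(b < item['days_until'] for b in bounds)
--
--     return {name: [item for item in estimasi_list if bucket(item) == i]
--             for i, name in enumerate(names)}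
-- ===== Notes on version B (the rewrite author's own statement) =====
-- stated objective: alternative
-- what changed: A threads one mutable five-key dict through a single loop with a five-way if/elif chain appending in place; B has no per-item branching or mutation: it maps each item to a numeric bucket index via a sorted boundary table (bisect_left by counting) and builds the dict by comprehension, one filter pass per category. Pre_ excludes items lacking a 'days_until' key, on which both A and B raise KeyError.
import Mathlib
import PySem

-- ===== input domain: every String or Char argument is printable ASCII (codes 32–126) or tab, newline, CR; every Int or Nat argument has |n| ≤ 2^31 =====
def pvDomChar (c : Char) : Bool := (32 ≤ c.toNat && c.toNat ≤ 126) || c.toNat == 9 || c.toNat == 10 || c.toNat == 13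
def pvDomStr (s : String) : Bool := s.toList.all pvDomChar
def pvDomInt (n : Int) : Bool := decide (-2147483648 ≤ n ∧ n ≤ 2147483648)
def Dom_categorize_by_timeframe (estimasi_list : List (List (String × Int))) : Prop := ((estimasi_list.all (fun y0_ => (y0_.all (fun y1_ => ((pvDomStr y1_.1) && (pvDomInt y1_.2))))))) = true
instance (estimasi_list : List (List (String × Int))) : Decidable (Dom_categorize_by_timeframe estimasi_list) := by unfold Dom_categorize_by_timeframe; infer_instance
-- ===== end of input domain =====

-- B replaces A's single loop over a mutated five-key dict (if/elif chain, in-place append)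
-- by a boundary-table bucket index and one filter pass per category; same cost, no speed claim.
-- Pre_ excludes items without a 'days_until' key (Python A raises KeyError there; so does B).

-- ===== PORT A =====
-- item['days_until']: first-match association-list lookup; `.getD 0` is never taken under Pre_
def pvDays (item : List (String × Int)) : Int :=
  ((item.lookup "days_until").getD 0)

-- categories[k].append(item): the dict keys are fixed and distinct, so the in-place append
-- rewrites the value at the (unique) matching key, keeping insertion order — exact here.
def pvAppendAt (d : List (String × List (List (String × Int)))) (k : String)
    (item : List (String × Int)) : List (String × List (List (String × Int))) :=
  d.map (fun p => if p.1 = k then (p.1, p.2 ++ [item]) else p)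

def categorize_by_timeframe (estimasi_list : List (List (String × Int))) :
    List (String × List (List (String × Int))) :=
  let categories : List (String × List (List (String × Int))) :=
    [("week_1", []), ("week_2", []), ("week_3", []), ("month_1", []), ("later", [])]
  estimasi_list.foldl (fun categories item =>
    let days := pvDays item
    if days < 0 then pvAppendAt categories "week_1" item
    else if days ≤ 7 then pvAppendAt categories "week_1" item
    else if days ≤ 14 then pvAppendAt categories "week_2" item
    else if days ≤ 21 then pvAppendAt categories "week_3" item
    else if days ≤ 30 then pvAppendAt categories "month_1" item
    else pvAppendAt categories "later" item) categories

-- ===== PORT B =====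
-- bucket(item) = sum(b < item['days_until'] for b in bounds)  (bisect_left by counting)
def pvBucket (item : List (String × Int)) : Int :=
  (([7, 14, 21, 30] : List Int).map
    (fun b => if b < ((item.lookup "days_until").getD 0) then (1 : Int) else 0)).sum

def categorize_by_timeframe_alt (estimasi_list : List (List (String × Int))) :
    List (String × List (List (String × Int))) :=
  let names : List String := ["week_1", "week_2", "week_3", "month_1", "later"]
  (PySem.List.enumerate names).map
    (fun p => (p.2, estimasi_list.filter (fun item => pvBucket item == p.1)))

-- ===== PRECONDITION & SPEC =====
-- Pre_ excludes exactly the inputs where some item lacks the 'days_until' key: Python A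
-- raises KeyError there (and B does too).
def Pre_categorize_by_timeframe (estimasi_list : List (List (String × Int))) : Prop :=
  ∀ item ∈ estimasi_list, (item.lookup "days_until").isSome

instance (estimasi_list : List (List (String × Int))) : Decidable (Pre_categorize_by_timeframe estimasi_list) := by unfold Pre_categorize_by_timeframe; infer_instance

def pvWitness_categorize_by_timeframe : (List (List (String × Int))) :=
  [[("days_until", 3)], [("days_until", 15)], [("days_until", 45)]]

def Spec_categorize_by_timeframe (estimasi_list : List (List (String × Int))) (out : List (String × List (List (String × Int)))) : Prop := out = categorize_by_timeframe_alt estimasi_list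
instance (estimasi_list : List (List (String × Int))) (out : List (String × List (List (String × Int)))) : Decidable (Spec_categorize_by_timeframe estimasi_list out) := by unfold Spec_categorize_by_timeframe; infer_instance

-- ===== CLAIM (what is proved, stated in full; the proofs are below) =====
def Claim_equal_categorize_by_timeframe : Prop := ∀ (estimasi_list : List (List (String × Int))), Dom_categorize_by_timeframe estimasi_list → Pre_categorize_by_timeframe estimasi_list → Spec_categorize_by_timeframe estimasi_list (categorize_by_timeframe estimasi_list)

-- ===== LEMMAS AND PROOFS =====

-- filter by bucket index i, as B builds category i
def pvFil (i : Int) (l : List (List (String × Int))) : List (List (String × Int)) :=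
  l.filter (fun item => pvBucket item == i)

lemma pvFil_cons (i : Int) (x : List (String × Int)) (l : List (List (String × Int))) :
    pvFil i (x :: l) = (if pvBucket x = i then [x] else []) ++ pvFil i l := by
  simp [pvFil, List.filter_cons]; split_ifs <;> simp_all

-- pvBucket written over pvDays
lemma pvBucket_eq (x : List (String × Int)) :
    pvBucket x = (if 7 < pvDays x then (1:Int) else 0) + ((if 14 < pvDays x then (1:Int) else 0)
      + ((if 21 < pvDays x then (1:Int) else 0) + (if 30 < pvDays x then (1:Int) else 0))) := by
  simp [pvBucket, pvDays]; split_ifs <;> norm_num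

-- the in-place append at each of the five literal keys
lemma appW1 (a b c d e : List (List (String × Int))) (x : List (String × Int)) :
    pvAppendAt [("week_1", a), ("week_2", b), ("week_3", c), ("month_1", d), ("later", e)] "week_1" x
    = [("week_1", a ++ [x]), ("week_2", b), ("week_3", c), ("month_1", d), ("later", e)] := by
  simp [pvAppendAt]

lemma appW2 (a b c d e : List (List (String × Int))) (x : List (String × Int)) :
    pvAppendAt [("week_1", a), ("week_2", b), ("week_3", c), ("month_1", d), ("later", e)] "week_2" x
    = [("week_1", a), ("week_2", b ++ [x]), ("week_3", c), ("month_1", d), ("later", e)] := by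
  simp [pvAppendAt]

lemma appW3 (a b c d e : List (List (String × Int))) (x : List (String × Int)) :
    pvAppendAt [("week_1", a), ("week_2", b), ("week_3", c), ("month_1", d), ("later", e)] "week_3" x
    = [("week_1", a), ("week_2", b), ("week_3", c ++ [x]), ("month_1", d), ("later", e)] := by
  simp [pvAppendAt]

lemma appM1 (a b c d e : List (List (String × Int))) (x : List (String × Int)) :
    pvAppendAt [("week_1", a), ("week_2", b), ("week_3", c), ("month_1", d), ("later", e)] "month_1" x
    = [("week_1", a), ("week_2", b), ("week_3", c), ("month_1", d ++ [x]), ("later", e)] := by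
  simp [pvAppendAt]

lemma appL (a b c d e : List (List (String × Int))) (x : List (String × Int)) :
    pvAppendAt [("week_1", a), ("week_2", b), ("week_3", c), ("month_1", d), ("later", e)] "later" x
    = [("week_1", a), ("week_2", b), ("week_3", c), ("month_1", d), ("later", e ++ [x])] := by
  simp [pvAppendAt]

-- A's fold over the literal five-key accumulator computes B's five filters
lemma foldA (l : List (List (String × Int))) (a b c d e : List (List (String × Int))) :
    l.foldl (fun categories item =>
      let days := pvDays item
      if days < 0 then pvAppendAt categories "week_1" item
      else if days ≤ 7 then pvAppendAt categories "week_1" item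
      else if days ≤ 14 then pvAppendAt categories "week_2" item
      else if days ≤ 21 then pvAppendAt categories "week_3" item
      else if days ≤ 30 then pvAppendAt categories "month_1" item
      else pvAppendAt categories "later" item)
      [("week_1", a), ("week_2", b), ("week_3", c), ("month_1", d), ("later", e)]
    = [("week_1", a ++ pvFil 0 l), ("week_2", b ++ pvFil 1 l), ("week_3", c ++ pvFil 2 l),
       ("month_1", d ++ pvFil 3 l), ("later", e ++ pvFil 4 l)] := by
  induction l generalizing a b c d e with
  | nil => simp [pvFil]
  | cons x xs ih =>
    rw [List.foldl_cons]
    show List.foldl _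
      (if pvDays x < 0 then _ else if pvDays x ≤ 7 then _ else if pvDays x ≤ 14 then _
       else if pvDays x ≤ 21 then _ else if pvDays x ≤ 30 then _ else _) xs = _
    by_cases h0 : pvDays x < 0
    · have hb : pvBucket x = 0 := by rw [pvBucket_eq]; split_ifs <;> omega
      rw [if_pos h0, appW1, ih]
      simp [pvFil_cons, hb]
    rw [if_neg h0]
    by_cases h1 : pvDays x ≤ 7
    · have hb : pvBucket x = 0 := by rw [pvBucket_eq]; split_ifs <;> omega
      rw [if_pos h1, appW1, ih]
      simp [pvFil_cons, hb]
    rw [if_neg h1]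
    by_cases h2 : pvDays x ≤ 14
    · have hb : pvBucket x = 1 := by rw [pvBucket_eq]; split_ifs <;> omega
      rw [if_pos h2, appW2, ih]
      simp [pvFil_cons, hb]
    rw [if_neg h2]
    by_cases h3 : pvDays x ≤ 21
    · have hb : pvBucket x = 2 := by rw [pvBucket_eq]; split_ifs <;> omega
      rw [if_pos h3, appW3, ih]
      simp [pvFil_cons, hb]
    rw [if_neg h3]
    by_cases h4 : pvDays x ≤ 30
    · have hb : pvBucket x = 3 := by rw [pvBucket_eq]; split_ifs <;> omega
      rw [if_pos h4, appM1, ih]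
      simp [pvFil_cons, hb]
    · have hb : pvBucket x = 4 := by rw [pvBucket_eq]; split_ifs <;> omega
      rw [if_neg h4, appL, ih]
      simp [pvFil_cons, hb]

-- ===== VERDICT (by name: the statement is the Claim_ definition above) =====
theorem categorize_by_timeframe_spec : Claim_equal_categorize_by_timeframe := by
  intro l _ _
  unfold Spec_categorize_by_timeframe categorize_by_timeframe categorize_by_timeframe_alt
  rw [foldA]
  simp [PySem.List.enumerate, pvFil]
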